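-- pv_equiv track=rewrite | github.com/daigo0927/ctci-6th | chap5/Q3.py | longest_seq_of_1s
-- ===== SOURCE A (Python) =====
-- SEQ_LENGTH = 32
--
-- def get_bit(num, i):
--     """
--     Return if i-th digit of given number is 1:True or 0:False
--
--     Args:
--     - int num: given number
--     - int i: target digit
--
--     Returns:
--     - bool: if i-th digits is 1 or 0
--     """
--     return (num&(1<<i)) != 0
--
-- def longest_seq_of_1s(n, index_to_ignore):
--     """
--     Get longest length of 1s sequences
--
--     Args:
--     - int n: input value
--     - int index_to_ignore: flipped (= ignored) index
--
--     Returns: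
--     - int: length of longest 1s sequence
--     """
--     max_ = 0
--     counter = 0
--     for i in range(SEQ_LENGTH):
--         if i == index_to_ignore or get_bit(n, i):
--             counter += 1
--             max_ = max(counter, max_)
--         else:
--             counter = 0
--     return max_
-- ===== SOURCE B (Python) =====
-- SEQ_LENGTH = 32
--
-- def get_bit(num, i):
--     return (num & (1 << i)) != 0
--
-- def longest_seq_of_1s(n, index_to_ignore):
--     bits = ''.join('1' if i == index_to_ignore or get_bit(n, i) else '0'
--                    for i in range(SEQ_LENGTH))
--     return max(len(run) for run in bits.split('0'))
-- ===== Notes on version B (the rewrite author's own statement) =====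
-- stated objective: idiomatic
-- what changed: Replaces the running counter/max single pass with a build-then-split-then-max decomposition: render the 32 bit tests as a '0'/'1' string, split on '0', and take the maximum piece length.
import Mathlib
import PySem

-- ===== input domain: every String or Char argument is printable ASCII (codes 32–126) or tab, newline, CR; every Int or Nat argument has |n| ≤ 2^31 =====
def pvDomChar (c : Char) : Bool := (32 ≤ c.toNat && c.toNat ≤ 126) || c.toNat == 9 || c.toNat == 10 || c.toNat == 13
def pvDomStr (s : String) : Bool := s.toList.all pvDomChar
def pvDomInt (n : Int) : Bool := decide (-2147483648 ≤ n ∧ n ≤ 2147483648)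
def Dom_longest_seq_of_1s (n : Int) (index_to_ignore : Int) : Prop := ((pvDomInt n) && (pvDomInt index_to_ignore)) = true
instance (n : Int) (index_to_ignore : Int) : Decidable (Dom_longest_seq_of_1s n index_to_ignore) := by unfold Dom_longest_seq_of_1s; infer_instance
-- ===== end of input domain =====

-- B builds the run string and takes max(len(run) for run in bits.split('0')) instead of A's
-- running counter/max pass (objective: idiomatic; same cost — 32 steps either way).

-- ===== PORT A =====
-- SEQ_LENGTH = 32
def pySEQ_LENGTH : Int := 32

-- get_bit(num, i): (num & (1 << i)) != 0.  i is always a value of range(32) here, so 0 ≤ i and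
-- Python's 1 << i is exactly Lean's 1 <<< i.toNat (PySem: shifts on Int are core <<<).
def get_bit (num : Int) (i : Int) : Bool := PySem.Int.band num (1 <<< i.toNat) != 0

def longest_seq_of_1s (n : Int) (index_to_ignore : Int) : Int :=
  let st := (PySem.List.pyRange 0 pySEQ_LENGTH 1).foldl
    (fun (st : Int × Int) i =>
      if i == index_to_ignore || get_bit n i then
        (max (st.2 + 1) st.1, st.2 + 1)     -- counter += 1; max_ = max(counter, max_)
      else
        (st.1, 0))                           -- counter = 0
    (0, 0)                                   -- (max_, counter)
  st.1

-- ===== PORT B =====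
-- hand port of Python's str.split('0') on a single-character separator, exact:
-- "".split('0') = [''] and every '0' separates (possibly empty) pieces.
def splitZero : List Char → List (List Char)
  | [] => [[]]
  | c :: cs =>
    if c = '0' then [] :: splitZero cs
    else
      match splitZero cs with
      | h :: t => (c :: h) :: t
      | [] => [[c]]   -- unreachable: splitZero never returns []

def longest_seq_of_1s_alt (n : Int) (index_to_ignore : Int) : Int :=
  let bits : List Char := (PySem.List.pyRange 0 pySEQ_LENGTH 1).map
    (fun i => if i == index_to_ignore || get_bit n i then '1' else '0')
  let lens : List Int := (splitZero bits).map (fun r => (r.length : Int))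
  match lens with
  | h :: t => t.foldl max h   -- max(...) over a nonempty list of run lengths
  | [] => 0                   -- unreachable: split never yields an empty list

-- ===== PRECONDITION & SPEC =====
def Spec_longest_seq_of_1s (n : Int) (index_to_ignore : Int) (out : Int) : Prop := out = longest_seq_of_1s_alt n index_to_ignore
instance (n : Int) (index_to_ignore : Int) (out : Int) : Decidable (Spec_longest_seq_of_1s n index_to_ignore out) := by unfold Spec_longest_seq_of_1s; infer_instance

-- ===== CLAIM (what is proved, stated in full; the proofs are below) =====
def Claim_equal_longest_seq_of_1s : Prop := ∀ (n : Int) (index_to_ignore : Int), Dom_longest_seq_of_1s n index_to_ignore → Spec_longest_seq_of_1s n index_to_ignore (longest_seq_of_1s n index_to_ignore)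

-- ===== LEMMAS AND PROOFS =====

-- the A-side loop body, on the boolean of the step
def stepA (st : Int × Int) (b : Bool) : Int × Int :=
  if b then (max (st.2 + 1) st.1, st.2 + 1) else (st.1, 0)

-- 'best c bs': length of the longest run of trues in bs, the first run extended by c
def best (c : Int) : List Bool → Int
  | [] => c
  | true :: bs => best (c + 1) bs
  | false :: bs => max c (best 0 bs)

def toChar (b : Bool) : Char := if b then '1' else '0'

lemma le_best (c : Int) (bs : List Bool) : c ≤ best c bs := by
  induction bs generalizing c with
  | nil => simp [best]
  | cons b bs ih =>
    cases b with
    | true => have := ih (c + 1); simp [best]; omega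
    | false => simp [best]

lemma foldl_stepA_eq (bs : List Bool) (m c : Int) (hc : 0 ≤ c) (hm : c ≤ m) :
    (bs.foldl stepA (m, c)).1 = max m (best c bs) := by
  induction bs generalizing m c with
  | nil => simp [best]; omega
  | cons b bs ih =>
    cases b with
    | true =>
      have h1 := ih (max (c + 1) m) (c + 1) (by omega) (by omega)
      have h2 := le_best (c + 1) bs
      simp only [List.foldl_cons, stepA, if_true, best]
      rw [h1]; omega
    | false =>
      have h1 := ih m 0 le_rfl (by omega)
      have h2 : (0 : Int) ≤ best 0 bs := le_best 0 bs
      simp only [List.foldl_cons, stepA, Bool.false_eq_true, if_false, best]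
      rw [h1]; omega

lemma splitZero_ne_nil (cs : List Char) : splitZero cs ≠ [] := by
  cases cs with
  | nil => simp [splitZero]
  | cons c cs =>
    simp only [splitZero]
    split
    · simp
    · cases h : splitZero cs <;> simp

lemma splitZero_cons_true (bs : List Bool) (h : List Char) (t : List (List Char))
    (he : splitZero (bs.map toChar) = h :: t) :
    splitZero ((true :: bs).map toChar) = ('1' :: h) :: t := by
  simp [toChar, splitZero, he]

lemma splitZero_cons_false (bs : List Bool) :
    splitZero ((false :: bs).map toChar) = [] :: splitZero (bs.map toChar) := by
  simp [toChar, splitZero]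

def maxLens (c : Int) (ls : List Int) : Int :=
  match ls with
  | h :: t => t.foldl max (c + h)
  | [] => 0

lemma foldl_max_max (t : List Int) (a b : Int) :
    t.foldl max (max a b) = max a (t.foldl max b) := by
  induction t generalizing b with
  | nil => simp
  | cons x t ih => simp only [List.foldl_cons, ← ih, max_assoc]

lemma splitZero_map_eq (bs : List Bool) (c : Int) (hc : 0 ≤ c) :
    maxLens c ((splitZero (bs.map toChar)).map (fun r => (r.length : Int))) = best c bs := by
  induction bs generalizing c with
  | nil => simp [splitZero, maxLens, best]
  | cons b bs ih =>
    obtain ⟨h, t, he⟩ : ∃ h t, splitZero (bs.map toChar) = h :: t := by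
      cases hs : splitZero (bs.map toChar) with
      | nil => exact absurd hs (splitZero_ne_nil _)
      | cons h t => exact ⟨h, t, rfl⟩
    cases b with
    | true =>
      have := ih (c + 1) (by omega)
      rw [splitZero_cons_true bs h t he]
      rw [he] at this
      simp only [maxLens, List.map_cons, best] at *
      simp only [List.length_cons]
      push_cast
      rw [show (c + ((h.length : Int) + 1)) = (c + 1) + h.length by ring]
      exact this
    | false =>
      have := ih 0 le_rfl
      rw [splitZero_cons_false bs, he] at *
      rw [he] at this
      simp only [maxLens, List.map_cons, best] at *
      simp only [List.foldl_cons]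
      rw [show max (c + (([] : List Char).length : Int)) (h.length : Int)
            = max c ((0 : Int) + h.length) by simp,
        foldl_max_max, this]

-- ===== VERDICT (by name: the statement is the Claim_ definition above) =====
theorem longest_seq_of_1s_spec : Claim_equal_longest_seq_of_1s := by
  intro n ig _
  unfold Spec_longest_seq_of_1s longest_seq_of_1s longest_seq_of_1s_alt
  set l := PySem.List.pyRange 0 pySEQ_LENGTH 1 with hl
  set bs := l.map (fun i => (i == ig || get_bit n i)) with hbs
  have hA : (List.foldl
      (fun (st : Int × Int) i =>
        if i == ig || get_bit n i then (max (st.2 + 1) st.1, st.2 + 1) else (st.1, 0))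
      ((0 : Int), (0 : Int)) l).1 = (List.foldl stepA (0, 0) bs).1 := by
    rw [hbs, List.foldl_map]
    rfl
  have hmap : l.map (fun i => if (i == ig || get_bit n i) then '1' else '0') = bs.map toChar := by
    rw [hbs, List.map_map]
    rfl
  have h1 : (List.foldl stepA ((0 : Int), (0 : Int)) bs).1 = best 0 bs := by
    rw [foldl_stepA_eq bs 0 0 le_rfl le_rfl]
    have := le_best 0 bs
    omega
  have h2 := splitZero_map_eq bs 0 le_rfl
  have hB : (match (splitZero (l.map (fun i => if (i == ig || get_bit n i) then '1' else '0'))).map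
        (fun r => (r.length : Int)) with
      | h :: t => t.foldl max h
      | [] => 0)
      = maxLens 0 ((splitZero (bs.map toChar)).map (fun r => (r.length : Int))) := by
    rw [hmap]
    cases (splitZero (bs.map toChar)).map (fun r => (r.length : Int)) with
    | nil => rfl
    | cons h t => simp [maxLens]
  simp only []
  rw [hA, h1, hB, h2]
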